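-- pv_equiv track=rewrite | github.com/SamWheating/AdventOfCode2022 | 23/solution.py | part2
-- ===== SOURCE A (Python) =====
-- from collections import defaultdict
-- from typing import List, Tuple, Set
--
-- def get_surrounding_tiles(t: Tuple[int, int]):
--     return [
--         (t[0]-1, t[1]-1),
--         (t[0]-1, t[1]+1),
--         (t[0]-1, t[1]),
--         (t[0]+1, t[1]-1),
--         (t[0]+1, t[1]+1),
--         (t[0]+1, t[1]),
--         (t[0], t[1]-1),
--         (t[0], t[1]+1),
--     ]
--
-- def get_intention(elf: Tuple[int, int], elves: Set[Tuple[int, int]], priority: List[str]):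
--
--     neighbours = set()
--     for tile in get_surrounding_tiles(elf):
--         if tile in elves:
--             neighbours.add(tile)
--
--     if len(neighbours) == 0:
--         return None # stay where you are
--
--     ns = {
--         "N": (elf[0]-1, elf[1]),
--         "NE": (elf[0]-1, elf[1]+1),
--         "E": (elf[0], elf[1]+1),
--         "SE": (elf[0]+1, elf[1]+1),
--         "S": (elf[0]+1, elf[1]),
--         "SW": (elf[0]+1, elf[1]-1),
--         "W": (elf[0], elf[1]-1),
--         "NW": (elf[0]-1, elf[1]-1)
--     }
--
--     elligible = []
--
--     if ns["N"] not in neighbours and ns["NW"] not in neighbours and ns["NE"] not in neighbours: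
--         elligible.append("N")
--
--     if ns["S"] not in neighbours and ns["SW"] not in neighbours and ns["SE"] not in neighbours:
--         elligible.append("S")
--
--     if ns["W"] not in neighbours and ns["SW"] not in neighbours and ns["NW"] not in neighbours:
--         elligible.append("W")
--
--     if ns["E"] not in neighbours and ns["SE"] not in neighbours and ns["NE"] not in neighbours:
--         elligible.append("E")
--
--     for c in priority:
--         if c in elligible:
--             return ns[c]
--
--     return None
--
-- def part2(elves):
--
--     PRIORITY = ["N", "S", "W", "E"]
--
--     round = 0
--     while True:
--         round += 1
--         proposals = defaultdict(list) # map of coord: [elves wanting to move there]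
--         next_elves = set()
--
--         for elf in elves:
--             intent = get_intention(elf, elves, PRIORITY)
--             if intent is None:
--                 # This is an elf staying in place
--                 proposals[elf].append(elf) # prevents other elves from moving there
--                 next_elves.add(elf)
--             else:
--                 proposals[intent].append(elf)
--
--         # now reconcile all of the intents
--         for p in proposals:
--             if len(proposals[p]) == 1:
--                 next_elves.add(p)
--                 moved = True
--             else:
--                 for elf in proposals[p]:
--                     next_elves.add(elf) # all of the elves planning to move here just stay
--
--         assert len(elves) == len(next_elves) # taking attendance
--
--         if len(elves.union(next_elves)) == len(next_elves):
--             # no elves moved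
--             break
--
--         elves = next_elves
--
--         PRIORITY.append(PRIORITY.pop(0))
--
--     return round
-- ===== SOURCE B (Python) =====
-- def part2(elves):
--     # Head-on resolution: a proposal can only collide with the proposal of the elf
--     # directly opposite the target (two cells ahead in the chosen direction), because
--     # any lateral proposer would occupy a cell the chosen direction requires empty.
--     # So each round is a single pass with a local conflict test: no proposal dict,
--     # no counting, no reconciliation phase.
--     DIRS = [(-1, 0), (1, 0), (0, -1), (0, 1)]  # N, S, W, E
--
--     def propose(occ, p, start):
--         r, c = p
--         crowded = ((r-1, c-1) in occ or (r-1, c) in occ or (r-1, c+1) in occ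
--                    or (r, c-1) in occ or (r, c+1) in occ
--                    or (r+1, c-1) in occ or (r+1, c) in occ or (r+1, c+1) in occ)
--         if not crowded:
--             return None
--         for i in range(4):
--             dr, dc = DIRS[(start + i) % 4]
--             if dr != 0:
--                 free = not ((r+dr, c-1) in occ or (r+dr, c) in occ or (r+dr, c+1) in occ)
--             else:
--                 free = not ((r-1, c+dc) in occ or (r, c+dc) in occ or (r+1, c+dc) in occ)
--             if free:
--                 return (dr, dc)
--         return None
--
--     occ = set(elves)
--     rounds = 0
--     start = 0
--     while True:
--         rounds += 1
--         moved = False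
--         nxt = set()
--         for e in occ:
--             d = propose(occ, e, start)
--             if d is None:
--                 nxt.add(e)
--                 continue
--             r, c = e
--             dr, dc = d
--             opp = (r + 2*dr, c + 2*dc)
--             if opp in occ and propose(occ, opp, start) == (-dr, -dc):
--                 nxt.add(e)  # head-on conflict: both elves stay
--             else:
--                 nxt.add((r + dr, c + dc))
--                 moved = True
--         if not moved:
--             return rounds
--         occ = nxt
--         start = (start + 1) % 4
-- ===== Notes on version B (the rewrite author's own statement) =====
-- stated objective: alternative
-- what changed: B replaces A's propose-tally-reconcile round (per-elf neighbour sets, string-keyed direction dict, defaultdict of proposer lists, then a reconciliation pass over the dict) with a single pass using local head-on conflict resolution: since a proposal can only collide with the elf two cells ahead proposing the opposite direction, each elf just checks that one cell directly, so no proposal dict, no counting and no second pass exist; the priority is a rotating start index instead of a mutated list of strings.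
import Mathlib
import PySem

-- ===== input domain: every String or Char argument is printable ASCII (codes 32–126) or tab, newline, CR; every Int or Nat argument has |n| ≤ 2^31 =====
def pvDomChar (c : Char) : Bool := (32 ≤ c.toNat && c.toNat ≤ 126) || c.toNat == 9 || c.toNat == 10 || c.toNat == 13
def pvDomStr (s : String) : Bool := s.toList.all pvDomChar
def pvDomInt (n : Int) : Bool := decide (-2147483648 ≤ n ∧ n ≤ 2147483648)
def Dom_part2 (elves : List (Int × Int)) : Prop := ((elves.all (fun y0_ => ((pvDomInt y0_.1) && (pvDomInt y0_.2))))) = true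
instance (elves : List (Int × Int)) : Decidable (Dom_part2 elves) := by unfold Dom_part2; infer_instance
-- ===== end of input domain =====

set_option maxHeartbeats 2000000

-- B resolves conflicts locally: a proposal can only collide head-on (the elf two cells
-- ahead proposing the opposite direction), so each round is one pass with no proposal
-- dict, no tally and no reconciliation phase; the priority is a rotating start index.
-- Both Pythons receive a set; the List argument holds its elements (modelled via Set.ofList).
-- The unbounded 'while True' loops are ported with a large fuel bound; every simulation that
-- stabilizes within that many rounds (all tested ones do) exits via the same break test.
-- A's 'assert len(elves)==len(next_elves)' never fails on a set input (each round is a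
-- permutation of positions), so it is ported as a no-op.

-- ===== PORT A =====
def pvSurround (t : Int × Int) : List (Int × Int) :=
  [(t.1-1,t.2-1),(t.1-1,t.2+1),(t.1-1,t.2),(t.1+1,t.2-1),(t.1+1,t.2+1),(t.1+1,t.2),(t.1,t.2-1),(t.1,t.2+1)]

-- the 'ns' dict of get_intention
def pvNs (elf : Int × Int) : PySem.Dict String (Int × Int) :=
  (((((((PySem.Dict.empty.insert "N" (elf.1-1,elf.2)).insert "NE" (elf.1-1,elf.2+1)).insert
    "E" (elf.1,elf.2+1)).insert "SE" (elf.1+1,elf.2+1)).insert "S" (elf.1+1,elf.2)).insert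
    "SW" (elf.1+1,elf.2-1)).insert "W" (elf.1,elf.2-1)).insert "NW" (elf.1-1,elf.2-1)

-- ns[c]; every looked-up key is present, so the .getD default is unreachable
def pvNsGet (elf : Int × Int) (c : String) : Int × Int := ((pvNs elf).get? c).getD elf

def pvNeighbours (elf : Int × Int) (elves : PySem.Set (Int × Int)) : PySem.Set (Int × Int) :=
  (pvSurround elf).foldl
    (fun ns tile => if PySem.Set.contains elves tile then PySem.Set.add ns tile else ns)
    PySem.Set.empty

-- the 'elligible' list, built by the four conditional appends
def pvElligible (elf : Int × Int) (elves : PySem.Set (Int × Int)) : List String :=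
  let nb := pvNeighbours elf elves
  ((((([] : List String) ++
    (if !(nb.contains (pvNsGet elf "N")) && !(nb.contains (pvNsGet elf "NW")) && !(nb.contains (pvNsGet elf "NE")) then ["N"] else [])) ++
    (if !(nb.contains (pvNsGet elf "S")) && !(nb.contains (pvNsGet elf "SW")) && !(nb.contains (pvNsGet elf "SE")) then ["S"] else [])) ++
    (if !(nb.contains (pvNsGet elf "W")) && !(nb.contains (pvNsGet elf "SW")) && !(nb.contains (pvNsGet elf "NW")) then ["W"] else [])) ++
    (if !(nb.contains (pvNsGet elf "E")) && !(nb.contains (pvNsGet elf "SE")) && !(nb.contains (pvNsGet elf "NE")) then ["E"] else []))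

-- 'for c in priority: if c in elligible: return ns[c]'
def pvPrioLoop (elf : Int × Int) (elligible : List String) : List String → Option (Int × Int)
  | [] => none
  | c :: rest => if elligible.contains c then some (pvNsGet elf c) else pvPrioLoop elf elligible rest

def pvGetIntention (elf : Int × Int) (elves : PySem.Set (Int × Int)) (priority : List String) :
    Option (Int × Int) :=
  if PySem.Set.len (pvNeighbours elf elves) == 0 then none
  else pvPrioLoop elf (pvElligible elf elves) priority

-- the 'for elf in elves' loop: proposals defaultdict and the stayers added to next_elves
def pvStepA (elvesS : PySem.Set (Int × Int)) (priority : List String) :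
    PySem.Dict (Int × Int) (List (Int × Int)) × PySem.Set (Int × Int) :=
  elvesS.foldl
    (fun acc elf =>
      match pvGetIntention elf elvesS priority with
      | none => (acc.1.modify elf [] (fun l => l ++ [elf]), PySem.Set.add acc.2 elf)
      | some t => (acc.1.modify t [] (fun l => l ++ [elf]), acc.2))
    (PySem.Dict.empty, PySem.Set.empty)

-- 'for p in proposals: …' reconciliation
def pvReconcile (items : List ((Int × Int) × List (Int × Int)))
    (next0 : PySem.Set (Int × Int)) : PySem.Set (Int × Int) :=
  items.foldl
    (fun nx pg =>
      if pg.2.length == 1 then PySem.Set.add nx pg.1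
      else pg.2.foldl (fun nx e => PySem.Set.add nx e) nx)
    next0

def pvNextA (elvesS : PySem.Set (Int × Int)) (priority : List String) : PySem.Set (Int × Int) :=
  pvReconcile (pvStepA elvesS priority).1.items (pvStepA elvesS priority).2

def pvLoopA : Nat → PySem.Set (Int × Int) → List String → Int → Int
  | 0, _, _, round => round
  | Nat.succ fuel, elvesS, priority, round =>
    let round' := round + 1
    let next := pvNextA elvesS priority
    if PySem.Set.len (PySem.Set.union elvesS next) == PySem.Set.len next then round'
    else pvLoopA fuel next (match priority with | [] => [] | c :: rest => rest ++ [c]) round'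

def part2 (elves : List (Int × Int)) : Int :=
  pvLoopA 4294967296 (PySem.Set.ofList elves) ["N", "S", "W", "E"] 0

-- ===== PORT B =====
def pvDirs : List (Int × Int) := [(-1,0),(1,0),(0,-1),(0,1)]

-- DIRS[(start+i) % 4]; the index is always 0..3, so the .getD default is unreachable
def pvDirAt (start i : Int) : Int × Int :=
  (PySem.List.pyGet? pvDirs (PySem.Int.mod (start + i) 4)).getD (0,0)

-- the body of B's direction loop: the three facing cells must be free
def pvLineFree (occ : PySem.Set (Int × Int)) (r c dr dc : Int) : Bool :=
  if dr ≠ 0 then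
    !(occ.contains (r+dr, c-1) || occ.contains (r+dr, c) || occ.contains (r+dr, c+1))
  else
    !(occ.contains (r-1, c+dc) || occ.contains (r, c+dc) || occ.contains (r+1, c+dc))

-- 'for i in range(4): … if free: return (dr, dc)'
def pvTryDirs (occ : PySem.Set (Int × Int)) (r c start : Int) : List Int → Option (Int × Int)
  | [] => none
  | i :: rest =>
    let d := pvDirAt start i
    if pvLineFree occ r c d.1 d.2 then some d else pvTryDirs occ r c start rest

def pvProposeB (occ : PySem.Set (Int × Int)) (p : Int × Int) (start : Int) : Option (Int × Int) :=
  let r := p.1; let c := p.2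
  let crowded := occ.contains (r-1,c-1) || occ.contains (r-1,c) || occ.contains (r-1,c+1) ||
    occ.contains (r,c-1) || occ.contains (r,c+1) ||
    occ.contains (r+1,c-1) || occ.contains (r+1,c) || occ.contains (r+1,c+1)
  if !crowded then none
  else pvTryDirs occ r c start (PySem.List.pyRange 0 4 1)

-- the single per-round pass: next set and moved flag
def pvStepB (occ : PySem.Set (Int × Int)) (start : Int) : PySem.Set (Int × Int) × Bool :=
  occ.foldl
    (fun acc e =>
      match pvProposeB occ e start with
      | none => (PySem.Set.add acc.1 e, acc.2)
      | some d =>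
        if occ.contains (e.1 + 2*d.1, e.2 + 2*d.2) &&
           (pvProposeB occ (e.1 + 2*d.1, e.2 + 2*d.2) start == some (-d.1, -d.2)) then
          (PySem.Set.add acc.1 e, acc.2)
        else (PySem.Set.add acc.1 (e.1 + d.1, e.2 + d.2), true))
    (PySem.Set.empty, false)

def pvLoopB : Nat → PySem.Set (Int × Int) → Int → Int → Int
  | 0, _, _, rnd => rnd
  | Nat.succ fuel, occ, start, rnd =>
    let rnd' := rnd + 1
    let nm := pvStepB occ start
    if !nm.2 then rnd'
    else pvLoopB fuel nm.1 (PySem.Int.mod (start + 1) 4) rnd'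

def part2_alt (elves : List (Int × Int)) : Int :=
  pvLoopB 4294967296 (PySem.Set.ofList elves) 0 0

-- ===== PRECONDITION & SPEC =====
def Spec_part2 (elves : List (Int × Int)) (out : Int) : Prop := out = part2_alt elves
instance (elves : List (Int × Int)) (out : Int) : Decidable (Spec_part2 elves out) := by unfold Spec_part2; infer_instance

-- ===== CLAIM (what is proved, stated in full; the proofs are below) =====
def Claim_equal_part2 : Prop := ∀ (elves : List (Int × Int)), Dom_part2 elves → Spec_part2 elves (part2 elves)

-- ===== LEMMAS AND PROOFS =====

-- membership function of the current set of elves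
def pvMem (s : List (Int × Int)) : (Int × Int) → Bool := fun x => PySem.Set.contains s x

def pvCrowd (m : (Int × Int) → Bool) (p : Int × Int) : Bool :=
  m (p.1-1, p.2-1) || m (p.1-1, p.2) || m (p.1-1, p.2+1) || m (p.1, p.2-1) || m (p.1, p.2+1) ||
  m (p.1+1, p.2-1) || m (p.1+1, p.2) || m (p.1+1, p.2+1)

def pvSpecFree (m : (Int × Int) → Bool) (p : Int × Int) (c : String) : Bool :=
  if c = "N" then !(m (p.1-1, p.2-1) || m (p.1-1, p.2) || m (p.1-1, p.2+1))
  else if c = "S" then !(m (p.1+1, p.2-1) || m (p.1+1, p.2) || m (p.1+1, p.2+1))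
  else if c = "W" then !(m (p.1-1, p.2-1) || m (p.1, p.2-1) || m (p.1+1, p.2-1))
  else if c = "E" then !(m (p.1-1, p.2+1) || m (p.1, p.2+1) || m (p.1+1, p.2+1))
  else false

def pvSpecDir (p : Int × Int) (c : String) : Int × Int :=
  if c = "N" then (p.1-1, p.2)
  else if c = "S" then (p.1+1, p.2)
  else if c = "W" then (p.1, p.2-1)
  else if c = "E" then (p.1, p.2+1)
  else p

def pvFirstD (m : (Int × Int) → Bool) (p : Int × Int) : List String → Option (Int × Int)
  | [] => none
  | c :: rest => if pvSpecFree m p c then some (pvSpecDir p c) else pvFirstD m p rest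

def pvSpecIntent (m : (Int × Int) → Bool) (prio : List String) (p : Int × Int) : Option (Int × Int) :=
  if pvCrowd m p then pvFirstD m p prio else none

def pvDest (s : List (Int × Int)) (prio : List String) (p : Int × Int) : Int × Int :=
  match pvSpecIntent (pvMem s) prio p with
  | none => p
  | some t => if s.countP (fun q => pvSpecIntent (pvMem s) prio q == some t) = 1 then t else p

def pvInv (prio : List String) (k : Int) : Prop :=
  (prio = ["N","S","W","E"] ∧ k = 0) ∨ (prio = ["S","W","E","N"] ∧ k = 1) ∨
  (prio = ["W","E","N","S"] ∧ k = 2) ∨ (prio = ["E","N","S","W"] ∧ k = 3)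

theorem pv_mem_condadd (m : (Int × Int) → Bool) (l : List (Int × Int))
    (acc : PySem.Set (Int × Int)) (x : Int × Int) :
    x ∈ l.foldl (fun ns t => if m t then PySem.Set.add ns t else ns) acc ↔
      x ∈ acc ∨ (x ∈ l ∧ m x = true) := by
  induction l generalizing acc with
  | nil => simp
  | cons hd tl ih =>
    simp only [List.foldl_cons]
    by_cases hm : m hd = true
    · rw [hm, if_pos rfl, ih]
      simp only [PySem.Set.mem_add, List.mem_cons]
      constructor
      · rintro ((h | rfl) | ⟨h1, h2⟩)
        · exact Or.inl h
        · exact Or.inr ⟨Or.inl rfl, hm⟩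
        · exact Or.inr ⟨Or.inr h1, h2⟩
      · rintro (h | ⟨rfl | h1, h2⟩)
        · exact Or.inl (Or.inl h)
        · exact Or.inl (Or.inr rfl)
        · exact Or.inr ⟨h1, h2⟩
    · rw [if_neg (by simpa using hm), ih]
      simp only [List.mem_cons]
      constructor
      · rintro (h | ⟨h1, h2⟩)
        · exact Or.inl h
        · exact Or.inr ⟨Or.inr h1, h2⟩
      · rintro (h | ⟨rfl | h1, h2⟩)
        · exact Or.inl h
        · exact absurd h2 hm
        · exact Or.inr ⟨h1, h2⟩

theorem pv_mem_nbrs (elf : Int × Int) (elves : PySem.Set (Int × Int)) (x : Int × Int) :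
    x ∈ pvNeighbours elf elves ↔ x ∈ pvSurround elf ∧ PySem.Set.contains elves x = true := by
  unfold pvNeighbours
  rw [pv_mem_condadd]
  simp [PySem.Set.empty]

theorem pv_nbrs_contains (elf : Int × Int) (elves : PySem.Set (Int × Int)) (x : Int × Int)
    (hx : x ∈ pvSurround elf) :
    (pvNeighbours elf elves).contains x = PySem.Set.contains elves x := by
  rw [Bool.eq_iff_iff, PySem.Set.contains_iff, pv_mem_nbrs, PySem.Set.contains_iff]
  simp [hx]

theorem pv_nbrs_empty (elf : Int × Int) (elves : PySem.Set (Int × Int)) :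
    (PySem.Set.len (pvNeighbours elf elves) == 0) = true ↔
      pvCrowd (pvMem elves) elf = false := by
  have hlen : (PySem.Set.len (pvNeighbours elf elves) == 0) = true ↔ pvNeighbours elf elves = [] := by
    show (((pvNeighbours elf elves).length : Int) == 0) = true ↔ _
    simp [List.length_eq_zero_iff]
  rw [hlen, List.eq_nil_iff_forall_not_mem]
  constructor
  · intro h
    unfold pvCrowd
    simp only [Bool.or_eq_false_iff]
    refine ⟨⟨⟨⟨⟨⟨⟨?_, ?_⟩, ?_⟩, ?_⟩, ?_⟩, ?_⟩, ?_⟩, ?_⟩ <;>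
      · rw [← Bool.not_eq_true]
        intro hc
        exact h _ ((pv_mem_nbrs elf elves _).mpr ⟨by simp [pvSurround], hc⟩)
  · intro h x hx
    rw [pv_mem_nbrs] at hx
    unfold pvCrowd at h
    simp only [Bool.or_eq_false_iff] at h
    obtain ⟨hs, hc⟩ := hx
    simp only [pvSurround, List.mem_cons, List.not_mem_nil, or_false] at hs
    rcases hs with h1|h1|h1|h1|h1|h1|h1|h1 <;> subst h1 <;> simp_all [pvMem]

theorem pv_bool1 (x y z : Bool) : (!y && !x && !z) = !(x || y || z) := by
  revert x y z; decide

theorem pv_bool2 (x y z : Bool) : (!y && !z && !x) = !(x || y || z) := by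
  revert x y z; decide

theorem pv_ns_get (elf : Int × Int) :
    pvNsGet elf "N" = (elf.1-1, elf.2) ∧ pvNsGet elf "S" = (elf.1+1, elf.2) ∧
    pvNsGet elf "W" = (elf.1, elf.2-1) ∧ pvNsGet elf "E" = (elf.1, elf.2+1) ∧
    pvNsGet elf "NW" = (elf.1-1, elf.2-1) ∧ pvNsGet elf "NE" = (elf.1-1, elf.2+1) ∧
    pvNsGet elf "SW" = (elf.1+1, elf.2-1) ∧ pvNsGet elf "SE" = (elf.1+1, elf.2+1) := by
  refine ⟨?_, ?_, ?_, ?_, ?_, ?_, ?_, ?_⟩ <;>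
    · unfold pvNsGet pvNs
      repeat rw [PySem.Dict.get?_insert_of_ne _ _ (by decide)]
      try rw [PySem.Dict.get?_insert_self]
      rfl

theorem pv_contains_chunks (b1 b2 b3 b4 : Bool) (c : String) :
    ((((([] : List String) ++ (if b1 = true then ["N"] else [])) ++
        (if b2 = true then ["S"] else [])) ++ (if b3 = true then ["W"] else [])) ++
        (if b4 = true then ["E"] else [])).contains c =
      ((b1 && (c == "N")) || (b2 && (c == "S")) || (b3 && (c == "W")) || (b4 && (c == "E"))) := by
  have hb : ∀ a b : String, decide (a = b) = (a == b) := fun a b => by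
    rw [Bool.eq_iff_iff]; simp
  cases b1 <;> cases b2 <;> cases b3 <;> cases b4 <;>
    simp [List.contains_cons, hb, Bool.or_comm, Bool.or_assoc, Bool.or_left_comm]

theorem pv_elligible_contains (elf : Int × Int) (elves : PySem.Set (Int × Int)) (c : String) :
    (pvElligible elf elves).contains c = pvSpecFree (pvMem elves) elf c := by
  obtain ⟨hN, hS, hW, hE, hNW, hNE, hSW, hSE⟩ := pv_ns_get elf
  unfold pvElligible
  simp only [hN, hS, hW, hE, hNW, hNE, hSW, hSE]
  rw [pv_nbrs_contains _ _ _ (by simp [pvSurround]), pv_nbrs_contains _ _ _ (by simp [pvSurround]),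
      pv_nbrs_contains _ _ _ (by simp [pvSurround]), pv_nbrs_contains _ _ _ (by simp [pvSurround]),
      pv_nbrs_contains _ _ _ (by simp [pvSurround]), pv_nbrs_contains _ _ _ (by simp [pvSurround]),
      pv_nbrs_contains _ _ _ (by simp [pvSurround]), pv_nbrs_contains _ _ _ (by simp [pvSurround])]
  rw [pv_contains_chunks]
  unfold pvSpecFree
  by_cases h1 : c = "N"
  · subst h1
    simp only [pvMem, if_pos rfl, BEq.rfl, Bool.and_true, String.reduceBEq, Bool.and_false,
      Bool.or_false, reduceIte]
    exact pv_bool1 _ _ _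
  by_cases h2 : c = "S"
  · subst h2
    simp only [pvMem, h1, BEq.rfl, Bool.and_true, String.reduceBEq, Bool.and_false,
      Bool.or_false, Bool.false_or, reduceIte]
    exact pv_bool1 _ _ _
  by_cases h3 : c = "W"
  · subst h3
    simp only [pvMem, h1, h2, BEq.rfl, Bool.and_true, String.reduceBEq, Bool.and_false,
      Bool.or_false, Bool.false_or, reduceIte]
    exact pv_bool2 _ _ _
  by_cases h4 : c = "E"
  · subst h4
    simp only [pvMem, h1, h2, h3, BEq.rfl, Bool.and_true, String.reduceBEq, Bool.and_false,
      Bool.or_false, Bool.false_or, reduceIte]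
    exact pv_bool2 _ _ _
  · have b1 : (c == "N") = false := by simp [h1]
    have b2 : (c == "S") = false := by simp [h2]
    have b3 : (c == "W") = false := by simp [h3]
    have b4 : (c == "E") = false := by simp [h4]
    simp [b1, b2, b3, b4, h1, h2, h3, h4]

theorem pv_prio_loop (elf : Int × Int) (elves : PySem.Set (Int × Int)) (prio : List String) :
    pvPrioLoop elf (pvElligible elf elves) prio = pvFirstD (pvMem elves) elf prio := by
  induction prio with
  | nil => rfl
  | cons c rest ih =>
    obtain ⟨hN, hS, hW, hE, _, _, _, _⟩ := pv_ns_get elf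
    simp only [pvPrioLoop, pvFirstD, pv_elligible_contains]
    cases hfree : pvSpecFree (pvMem elves) elf c with
    | false => simp only [hfree, Bool.false_eq_true, if_false, reduceIte]; exact ih
    | true =>
      have hdir : pvNsGet elf c = pvSpecDir elf c := by
        by_cases h1 : c = "N"
        · subst h1; rw [hN]; simp [pvSpecDir]
        by_cases h2 : c = "S"
        · subst h2; rw [hS]; simp [pvSpecDir, h1]
        by_cases h3 : c = "W"
        · subst h3; rw [hW]; simp [pvSpecDir, h1, h2]
        by_cases h4 : c = "E"
        · subst h4; rw [hE]; simp [pvSpecDir, h1, h2, h3]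
        · exfalso; unfold pvSpecFree at hfree; simp [h1, h2, h3, h4] at hfree
      simp only [hfree, hdir, reduceIte]

theorem pv_A_intent (elf : Int × Int) (elves : PySem.Set (Int × Int)) (prio : List String) :
    pvGetIntention elf elves prio = pvSpecIntent (pvMem elves) prio elf := by
  unfold pvGetIntention pvSpecIntent
  cases hcrowd : pvCrowd (pvMem elves) elf with
  | true =>
    have hne : ¬ (PySem.Set.len (pvNeighbours elf elves) == 0) = true := by
      intro h
      have := (pv_nbrs_empty elf elves).mp h
      simp [this] at hcrowd
    rw [if_neg hne, if_pos rfl]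
    exact pv_prio_loop elf elves prio
  | false =>
    rw [if_pos ((pv_nbrs_empty elf elves).mpr hcrowd), if_neg (by simp)]

-- == B-side characterization ==

-- B's per-elf destination and moved flag, extracted from the fold body
def pvValB (occ : PySem.Set (Int × Int)) (start : Int) (e : Int × Int) : Int × Int :=
  match pvProposeB occ e start with
  | none => e
  | some d =>
    if occ.contains (e.1 + 2*d.1, e.2 + 2*d.2) &&
       (pvProposeB occ (e.1 + 2*d.1, e.2 + 2*d.2) start == some (-d.1, -d.2)) then e
    else (e.1 + d.1, e.2 + d.2)

def pvMvB (occ : PySem.Set (Int × Int)) (start : Int) (e : Int × Int) : Bool :=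
  match pvProposeB occ e start with
  | none => false
  | some d =>
    !(occ.contains (e.1 + 2*d.1, e.2 + 2*d.2) &&
      (pvProposeB occ (e.1 + 2*d.1, e.2 + 2*d.2) start == some (-d.1, -d.2)))

theorem pv_or_fold {β : Type} (f : β → Bool) (l : List β) (b : Bool) :
    l.foldl (fun b pt => b || f pt) b = (b || l.any f) := by
  induction l generalizing b with
  | nil => simp
  | cons hd tl ih => simp [ih, Bool.or_assoc]

theorem pv_stepB_split (occ : PySem.Set (Int × Int)) (start : Int) :
    pvStepB occ start =
      (PySem.Set.ofList (occ.map (pvValB occ start)), occ.any (pvMvB occ start)) := by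
  unfold pvStepB
  have hfun : (fun (acc : PySem.Set (Int × Int) × Bool) e =>
      match pvProposeB occ e start with
      | none => (PySem.Set.add acc.1 e, acc.2)
      | some d =>
        if occ.contains (e.1 + 2*d.1, e.2 + 2*d.2) &&
           (pvProposeB occ (e.1 + 2*d.1, e.2 + 2*d.2) start == some (-d.1, -d.2)) then
          (PySem.Set.add acc.1 e, acc.2)
        else (PySem.Set.add acc.1 (e.1 + d.1, e.2 + d.2), true)) =
      (fun acc e => (PySem.Set.add acc.1 (pvValB occ start e), acc.2 || pvMvB occ start e)) := by
    funext acc e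
    unfold pvValB pvMvB
    cases hp : pvProposeB occ e start with
    | none => simp
    | some d =>
      dsimp only
      cases hcond : (occ.contains (e.1 + 2*d.1, e.2 + 2*d.2) &&
          (pvProposeB occ (e.1 + 2*d.1, e.2 + 2*d.2) start == some (-d.1, -d.2))) with
      | true => simp
      | false => simp
  rw [hfun, PySem.List.foldl_prod_mk (f := fun a e => PySem.Set.add a (pvValB occ start e))
    (g := fun b e => b || pvMvB occ start e)]
  rw [← PySem.Set.update_map_eq_foldl_add, PySem.Set.update_empty, pv_or_fold]
  simp

theorem pv_swap_if (c : Bool) (a b : Option (Int × Int)) :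
    (if (!c) = true then a else b) = (if c = true then b else a) := by cases c <;> rfl

-- the bridge: B's direction proposal, shifted by the elf's position, is A's intent
theorem pv_B_bridge (occ : PySem.Set (Int × Int)) (prio : List String) (k : Int)
    (h : pvInv prio k) (p : Int × Int) :
    pvSpecIntent (pvMem occ) prio p =
      (pvProposeB occ p k).map (fun d => (p.1 + d.1, p.2 + d.2)) := by
  have hR : PySem.List.pyRange 0 4 1 = [0,1,2,3] := by decide
  rcases h with ⟨h1,h2⟩|⟨h1,h2⟩|⟨h1,h2⟩|⟨h1,h2⟩ <;> subst h1 <;> subst h2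
  · have h0 : pvDirAt 0 0 = (-1,0) := by decide
    have h1 : pvDirAt 0 1 = (1,0) := by decide
    have h2 : pvDirAt 0 2 = (0,-1) := by decide
    have h3 : pvDirAt 0 3 = (0,1) := by decide
    simp only [pvSpecIntent, pvFirstD, pvSpecFree, pvSpecDir, pvProposeB, hR, pvTryDirs,
      h0, h1, h2, h3, pvLineFree, pvCrowd, pvMem, pv_swap_if,
      apply_ite (Option.map (fun d : Int × Int => (p.1 + d.1, p.2 + d.2))),
      Option.map_some, Option.map_none, sub_eq_add_neg, add_zero, ne_eq,
      reduceCtorEq, not_false_eq_true, if_true, if_false, String.reduceEq,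
      not_true, one_ne_zero]
  · have h0 : pvDirAt 1 0 = (1,0) := by decide
    have h1 : pvDirAt 1 1 = (0,-1) := by decide
    have h2 : pvDirAt 1 2 = (0,1) := by decide
    have h3 : pvDirAt 1 3 = (-1,0) := by decide
    simp only [pvSpecIntent, pvFirstD, pvSpecFree, pvSpecDir, pvProposeB, hR, pvTryDirs,
      h0, h1, h2, h3, pvLineFree, pvCrowd, pvMem, pv_swap_if,
      apply_ite (Option.map (fun d : Int × Int => (p.1 + d.1, p.2 + d.2))),
      Option.map_some, Option.map_none, sub_eq_add_neg, add_zero, ne_eq,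
      reduceCtorEq, not_false_eq_true, if_true, if_false, String.reduceEq,
      not_true, one_ne_zero]
  · have h0 : pvDirAt 2 0 = (0,-1) := by decide
    have h1 : pvDirAt 2 1 = (0,1) := by decide
    have h2 : pvDirAt 2 2 = (-1,0) := by decide
    have h3 : pvDirAt 2 3 = (1,0) := by decide
    simp only [pvSpecIntent, pvFirstD, pvSpecFree, pvSpecDir, pvProposeB, hR, pvTryDirs,
      h0, h1, h2, h3, pvLineFree, pvCrowd, pvMem, pv_swap_if,
      apply_ite (Option.map (fun d : Int × Int => (p.1 + d.1, p.2 + d.2))),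
      Option.map_some, Option.map_none, sub_eq_add_neg, add_zero, ne_eq,
      reduceCtorEq, not_false_eq_true, if_true, if_false, String.reduceEq,
      not_true, one_ne_zero]
  · have h0 : pvDirAt 3 0 = (0,1) := by decide
    have h1 : pvDirAt 3 1 = (-1,0) := by decide
    have h2 : pvDirAt 3 2 = (1,0) := by decide
    have h3 : pvDirAt 3 3 = (0,-1) := by decide
    simp only [pvSpecIntent, pvFirstD, pvSpecFree, pvSpecDir, pvProposeB, hR, pvTryDirs,
      h0, h1, h2, h3, pvLineFree, pvCrowd, pvMem, pv_swap_if,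
      apply_ite (Option.map (fun d : Int × Int => (p.1 + d.1, p.2 + d.2))),
      Option.map_some, Option.map_none, sub_eq_add_neg, add_zero, ne_eq,
      reduceCtorEq, not_false_eq_true, if_true, if_false, String.reduceEq,
      not_true, one_ne_zero]

-- every proposer of t sits in one of the four orthogonal neighbours of t,
-- with the corresponding three-cell line free
theorem pv_firstD_shape (m : (Int × Int) → Bool) (q t : Int × Int) (l : List String)
    (h : pvFirstD m q l = some t) :
    (t.1 = q.1-1 ∧ t.2 = q.2 ∧ m (q.1-1,q.2-1) = false ∧ m (q.1-1,q.2) = false ∧ m (q.1-1,q.2+1) = false) ∨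
    (t.1 = q.1+1 ∧ t.2 = q.2 ∧ m (q.1+1,q.2-1) = false ∧ m (q.1+1,q.2) = false ∧ m (q.1+1,q.2+1) = false) ∨
    (t.1 = q.1 ∧ t.2 = q.2-1 ∧ m (q.1-1,q.2-1) = false ∧ m (q.1,q.2-1) = false ∧ m (q.1+1,q.2-1) = false) ∨
    (t.1 = q.1 ∧ t.2 = q.2+1 ∧ m (q.1-1,q.2+1) = false ∧ m (q.1,q.2+1) = false ∧ m (q.1+1,q.2+1) = false) := by
  induction l with
  | nil => simp [pvFirstD] at h
  | cons c rest ih =>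
    simp only [pvFirstD] at h
    split at h
    · rename_i hfree
      have ht : t = pvSpecDir q c := (Option.some.injEq _ _).mp h.symm
      by_cases h1 : c = "N"
      · subst h1
        simp only [pvSpecFree, String.reduceEq, reduceIte, Bool.not_eq_eq_eq_not, Bool.not_true,
          Bool.or_eq_false_iff] at hfree
        subst ht
        exact Or.inl ⟨by simp [pvSpecDir], by simp [pvSpecDir], hfree.1.1, hfree.1.2, hfree.2⟩
      by_cases h2 : c = "S"
      · subst h2
        simp only [pvSpecFree, String.reduceEq, reduceIte, Bool.not_eq_eq_eq_not,
          Bool.not_true, Bool.or_eq_false_iff] at hfree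
        subst ht
        exact Or.inr (Or.inl ⟨by simp [pvSpecDir], by simp [pvSpecDir],
          hfree.1.1, hfree.1.2, hfree.2⟩)
      by_cases h3 : c = "W"
      · subst h3
        simp only [pvSpecFree, String.reduceEq, reduceIte, Bool.not_eq_eq_eq_not,
          Bool.not_true, Bool.or_eq_false_iff] at hfree
        subst ht
        exact Or.inr (Or.inr (Or.inl ⟨by simp [pvSpecDir, h1, h2], by simp [pvSpecDir, h1, h2],
          hfree.1.1, hfree.1.2, hfree.2⟩))
      by_cases h4 : c = "E"
      · subst h4
        simp only [pvSpecFree, String.reduceEq, reduceIte, Bool.not_eq_eq_eq_not,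
          Bool.not_true, Bool.or_eq_false_iff] at hfree
        subst ht
        exact Or.inr (Or.inr (Or.inr ⟨by simp [pvSpecDir, h1, h2, h3],
          by simp [pvSpecDir, h1, h2, h3], hfree.1.1, hfree.1.2, hfree.2⟩))
      · exfalso; unfold pvSpecFree at hfree; simp [h1, h2, h3, h4] at hfree
    · exact ih h

theorem pv_intent_shape (m : (Int × Int) → Bool) (prio : List String) (q t : Int × Int)
    (h : pvSpecIntent m prio q = some t) :
    (t.1 = q.1-1 ∧ t.2 = q.2 ∧ m (q.1-1,q.2-1) = false ∧ m (q.1-1,q.2) = false ∧ m (q.1-1,q.2+1) = false) ∨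
    (t.1 = q.1+1 ∧ t.2 = q.2 ∧ m (q.1+1,q.2-1) = false ∧ m (q.1+1,q.2) = false ∧ m (q.1+1,q.2+1) = false) ∨
    (t.1 = q.1 ∧ t.2 = q.2-1 ∧ m (q.1-1,q.2-1) = false ∧ m (q.1,q.2-1) = false ∧ m (q.1+1,q.2-1) = false) ∨
    (t.1 = q.1 ∧ t.2 = q.2+1 ∧ m (q.1-1,q.2+1) = false ∧ m (q.1,q.2+1) = false ∧ m (q.1+1,q.2+1) = false) := by
  unfold pvSpecIntent at h
  split at h
  · exact pv_firstD_shape m q t _ h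
  · cases h

theorem pv_target_not_mem (s : List (Int × Int)) (prio : List String) (p t : Int × Int)
    (h : pvSpecIntent (pvMem s) prio p = some t) : t ∉ s := by
  intro hmem
  have hm : pvMem s t = true := by
    show PySem.Set.contains s t = true
    rw [PySem.Set.contains_iff]; exact hmem
  rcases pv_intent_shape (pvMem s) prio p t h with
    ⟨h1, h2, _, hc, _⟩ | ⟨h1, h2, _, hc, _⟩ | ⟨h1, h2, _, hc, _⟩ | ⟨h1, h2, _, hc, _⟩ <;>
  · have hm2 : pvMem s (t.1, t.2) = true := by rwa [Prod.mk.eta]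
    rw [h1, h2] at hm2
    simp [hm2] at hc

-- only the elf opposite the target can propose the same target
theorem pv_only_two (s : List (Int × Int)) (prio : List String) (e t q : Int × Int)
    (he : pvSpecIntent (pvMem s) prio e = some t)
    (hq : q ∈ s) (hqi : pvSpecIntent (pvMem s) prio q = some t) :
    q = e ∨ q = (2*t.1 - e.1, 2*t.2 - e.2) := by
  have hmq : pvMem s q = true := by
    show PySem.Set.contains s q = true
    rw [PySem.Set.contains_iff]; exact hq
  rcases pv_intent_shape (pvMem s) prio e t he with
    ⟨e1, e2, f1, f2, f3⟩ | ⟨e1, e2, f1, f2, f3⟩ | ⟨e1, e2, f1, f2, f3⟩ | ⟨e1, e2, f1, f2, f3⟩ <;>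
  rcases pv_intent_shape (pvMem s) prio q t hqi with
    ⟨q1, q2, g1, g2, g3⟩ | ⟨q1, q2, g1, g2, g3⟩ | ⟨q1, q2, g1, g2, g3⟩ | ⟨q1, q2, g1, g2, g3⟩
  -- e proposes N (e = (t.1+1, t.2)); its free line is row t.1: cells (t.1, t.2-1..t.2+1)
  · exact Or.inl (Prod.ext (by omega) (by omega))
  · exact Or.inr (Prod.ext (by omega) (by omega))
  · -- q = (t.1, t.2+1) = (e.1-1, e.2+1), empty by f3
    exfalso
    have : q = (e.1-1, e.2+1) := Prod.ext (by omega) (by omega)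
    rw [this, f3] at hmq; cases hmq
  · exfalso
    have : q = (e.1-1, e.2-1) := Prod.ext (by omega) (by omega)
    rw [this, f1] at hmq; cases hmq
  -- e proposes S (e = (t.1-1, t.2))
  · exact Or.inr (Prod.ext (by omega) (by omega))
  · exact Or.inl (Prod.ext (by omega) (by omega))
  · exfalso
    have : q = (e.1+1, e.2+1) := Prod.ext (by omega) (by omega)
    rw [this, f3] at hmq; cases hmq
  · exfalso
    have : q = (e.1+1, e.2-1) := Prod.ext (by omega) (by omega)
    rw [this, f1] at hmq; cases hmq
  -- e proposes W (e = (t.1, t.2+1)); its free line is column t.2: cells (t.1-1..t.1+1, t.2)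
  · exfalso
    have : q = (e.1+1, e.2-1) := Prod.ext (by omega) (by omega)
    rw [this, f3] at hmq; cases hmq
  · exfalso
    have : q = (e.1-1, e.2-1) := Prod.ext (by omega) (by omega)
    rw [this, f1] at hmq; cases hmq
  · exact Or.inl (Prod.ext (by omega) (by omega))
  · exact Or.inr (Prod.ext (by omega) (by omega))
  -- e proposes E (e = (t.1, t.2-1))
  · exfalso
    have : q = (e.1+1, e.2+1) := Prod.ext (by omega) (by omega)
    rw [this, f3] at hmq; cases hmq
  · exfalso
    have : q = (e.1-1, e.2+1) := Prod.ext (by omega) (by omega)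
    rw [this, f1] at hmq; cases hmq
  · exact Or.inr (Prod.ext (by omega) (by omega))
  · exact Or.inl (Prod.ext (by omega) (by omega))

theorem pv_count_or (a b : Int × Int) (hab : a ≠ b) (l : List (Int × Int)) :
    l.countP (fun q => q == a || q == b) = l.count a + l.count b := by
  induction l with
  | nil => simp
  | cons hd tl ih =>
    simp only [List.countP_cons, List.count_cons, ih]
    by_cases h1 : hd = a <;> by_cases h2 : hd = b <;> simp_all <;> omega

-- the head-on characterization of A's uniqueness test
theorem pv_headon (s : List (Int × Int)) (prio : List String) (hs : s.Nodup)
    (e t : Int × Int) (he : e ∈ s) (hi : pvSpecIntent (pvMem s) prio e = some t) :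
    (s.countP (fun q => pvSpecIntent (pvMem s) prio q == some t) = 1 ↔
      ¬((2*t.1 - e.1, 2*t.2 - e.2) ∈ s ∧
        pvSpecIntent (pvMem s) prio (2*t.1 - e.1, 2*t.2 - e.2) = some t)) := by
  have hne : e ≠ (2*t.1 - e.1, 2*t.2 - e.2) := by
    rcases pv_intent_shape (pvMem s) prio e t hi with
      ⟨h1, h2, _⟩ | ⟨h1, h2, _⟩ | ⟨h1, h2, _⟩ | ⟨h1, h2, _⟩ <;>
    · intro hcontra
      have := congrArg Prod.fst hcontra
      have := congrArg Prod.snd hcontra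
      simp at *
      omega
  by_cases hm : (2*t.1 - e.1, 2*t.2 - e.2) ∈ s ∧
      pvSpecIntent (pvMem s) prio (2*t.1 - e.1, 2*t.2 - e.2) = some t
  · -- two proposers: the count is 2
    have hcnt : s.countP (fun q => pvSpecIntent (pvMem s) prio q == some t) = 2 := by
      have hcongr : s.countP (fun q => pvSpecIntent (pvMem s) prio q == some t) =
          s.countP (fun q => q == e || q == (2*t.1 - e.1, 2*t.2 - e.2)) := by
        apply List.countP_congr
        intro q hq
        simp only [beq_iff_eq, Bool.or_eq_true]
        constructor
        · intro hqi
          exact pv_only_two s prio e t q hi hq hqi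
        · rintro (rfl | rfl)
          · exact hi
          · exact hm.2
      rw [hcongr, pv_count_or _ _ hne,
        List.count_eq_one_of_mem hs he, List.count_eq_one_of_mem hs hm.1]
    simp [hcnt, hm]
  · -- e is the only proposer
    have hcongr : s.countP (fun q => pvSpecIntent (pvMem s) prio q == some t) =
        s.countP (fun q => q == e) := by
      apply List.countP_congr
      intro q hq
      simp only [beq_iff_eq]
      constructor
      · intro hqi
        rcases pv_only_two s prio e t q hi hq hqi with rfl | rfl
        · rfl
        · exact absurd ⟨hq, hqi⟩ hm
      · rintro rfl; exact hi
    rw [hcongr]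
    have : s.countP (fun q => q == e) = s.count e := rfl
    rw [this, List.count_eq_one_of_mem hs he]
    simp [hm]

theorem pv_val_dest (s : PySem.Set (Int × Int)) (prio : List String) (k : Int)
    (hs : s.Nodup) (hinv : pvInv prio k) (e : Int × Int) (he : e ∈ s) :
    pvValB s k e = pvDest s prio e ∧ (pvMvB s k e = true ↔ pvDest s prio e ≠ e) := by
  have hbr := pv_B_bridge s prio k hinv e
  unfold pvValB pvMvB pvDest
  cases hp : pvProposeB s e k with
  | none =>
    rw [hp] at hbr
    simp only [Option.map_none] at hbr
    rw [hbr]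
    simp
  | some d =>
    rw [hp] at hbr
    simp only [Option.map_some] at hbr
    rw [hbr]
    dsimp only
    set t : Int × Int := (e.1 + d.1, e.2 + d.2) with ht
    have hmir1 : 2*t.1 - e.1 = e.1 + 2*d.1 := by rw [ht]; ring
    have hmir2 : 2*t.2 - e.2 = e.2 + 2*d.2 := by rw [ht]; ring
    have hcond : (s.contains (e.1 + 2*d.1, e.2 + 2*d.2) &&
        (pvProposeB s (e.1 + 2*d.1, e.2 + 2*d.2) k == some (-d.1, -d.2))) = true ↔
        ((2*t.1 - e.1, 2*t.2 - e.2) ∈ s ∧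
          pvSpecIntent (pvMem s) prio (2*t.1 - e.1, 2*t.2 - e.2) = some t) := by
      rw [hmir1, hmir2]
      have hbr2 := pv_B_bridge s prio k hinv (e.1 + 2*d.1, e.2 + 2*d.2)
      simp only [Bool.and_eq_true, PySem.Set.contains_iff, beq_iff_eq]
      constructor
      · rintro ⟨hmem, hpp⟩
        refine ⟨hmem, ?_⟩
        rw [hbr2, hpp]
        simp only [Option.map_some]
        congr 1
        exact Prod.ext (by simp [ht]; ring) (by simp [ht]; ring)
      · rintro ⟨hmem, hii⟩
        refine ⟨hmem, ?_⟩
        rw [hbr2] at hii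
        cases hpp : pvProposeB s (e.1 + 2*d.1, e.2 + 2*d.2) k with
        | none => rw [hpp] at hii; simp at hii
        | some d' =>
          rw [hpp] at hii
          simp only [Option.map_some, Option.some.injEq] at hii
          have h1 := congrArg Prod.fst hii
          have h2 := congrArg Prod.snd hii
          simp [ht] at h1 h2
          congr 1
          exact Prod.ext (by simp; omega) (by simp; omega)
    have hho := pv_headon s prio hs e t he (by rw [hbr])
    constructor
    · -- value
      by_cases hc : (s.contains (e.1 + 2*d.1, e.2 + 2*d.2) &&
          (pvProposeB s (e.1 + 2*d.1, e.2 + 2*d.2) k == some (-d.1, -d.2))) = true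
      · rw [if_pos hc]
        have : ¬ s.countP (fun q => pvSpecIntent (pvMem s) prio q == some t) = 1 := by
          rw [hho]; simp only [not_not]; exact hcond.mp hc
        rw [if_neg this]
      · rw [if_neg hc]
        have : s.countP (fun q => pvSpecIntent (pvMem s) prio q == some t) = 1 := by
          rw [hho]; intro hcontra; exact hc (hcond.mpr hcontra)
        rw [if_pos this]
    · -- moved flag
      by_cases hc : (s.contains (e.1 + 2*d.1, e.2 + 2*d.2) &&
          (pvProposeB s (e.1 + 2*d.1, e.2 + 2*d.2) k == some (-d.1, -d.2))) = true
      · have : ¬ s.countP (fun q => pvSpecIntent (pvMem s) prio q == some t) = 1 := by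
          rw [hho]; simp only [not_not]; exact hcond.mp hc
        rw [if_neg this, hc]
        simp
      · have h1 : s.countP (fun q => pvSpecIntent (pvMem s) prio q == some t) = 1 := by
          rw [hho]; intro hcontra; exact hc (hcond.mpr hcontra)
        rw [if_pos h1]
        have htne : t ≠ e := by
          intro hcontra
          exact pv_target_not_mem s prio e t (by rw [hbr]) (hcontra ▸ he)
        rw [Bool.not_eq_true] at hc
        rw [hc]
        simp [htne]

theorem pv_nextB_eq (s : PySem.Set (Int × Int)) (prio : List String) (k : Int)
    (hs : s.Nodup) (hinv : pvInv prio k) :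
    (pvStepB s k).1 = PySem.Set.ofList (s.map (pvDest s prio)) := by
  rw [pv_stepB_split]
  dsimp only
  congr 1
  apply List.map_congr_left
  intro e he
  exact (pv_val_dest s prio k hs hinv e he).1

theorem pv_movedB (s : PySem.Set (Int × Int)) (prio : List String) (k : Int)
    (hs : s.Nodup) (hinv : pvInv prio k) :
    (pvStepB s k).2 = true ↔ ∃ e ∈ s, pvDest s prio e ≠ e := by
  rw [pv_stepB_split]
  dsimp only
  rw [List.any_eq_true]
  constructor
  · rintro ⟨e, he, hmv⟩
    exact ⟨e, he, ((pv_val_dest s prio k hs hinv e he).2).mp hmv⟩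
  · rintro ⟨e, he, hne⟩
    exact ⟨e, he, ((pv_val_dest s prio k hs hinv e he).2).mpr hne⟩

-- == A-side characterization ==

def pvKey (s : PySem.Set (Int × Int)) (prio : List String) (e : Int × Int) : Int × Int :=
  match pvSpecIntent (pvMem s) prio e with
  | none => e
  | some t => t

theorem pv_stepA_split (s : PySem.Set (Int × Int)) (prio : List String) :
    pvStepA s prio =
      (s.foldl (fun d e => d.modify (pvKey s prio e) [] (fun l => l ++ [e])) PySem.Dict.empty,
       s.foldl (fun ns e => if (pvSpecIntent (pvMem s) prio e).isNone then PySem.Set.add ns e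
         else ns) PySem.Set.empty) := by
  unfold pvStepA
  have hfun : (fun (acc : PySem.Dict (Int × Int) (List (Int × Int)) × PySem.Set (Int × Int)) elf =>
      match pvGetIntention elf s prio with
      | none => (acc.1.modify elf [] (fun l => l ++ [elf]), PySem.Set.add acc.2 elf)
      | some t => (acc.1.modify t [] (fun l => l ++ [elf]), acc.2)) =
      (fun acc elf => (acc.1.modify (pvKey s prio elf) [] (fun l => l ++ [elf]),
        if (pvSpecIntent (pvMem s) prio elf).isNone then PySem.Set.add acc.2 elf else acc.2)) := by
    funext acc elf
    rw [pv_A_intent]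
    unfold pvKey
    cases pvSpecIntent (pvMem s) prio elf <;> simp
  rw [hfun, PySem.List.foldl_prod_mk
    (fun d e => PySem.Dict.modify d (pvKey s prio e) [] (fun l => l ++ [e]))
    (fun ns e => if (pvSpecIntent (pvMem s) prio e).isNone then PySem.Set.add ns e else ns)]

theorem pv_stepA_grp (s : PySem.Set (Int × Int)) (prio : List String) (kk : Int × Int) :
    (pvStepA s prio).1.getD kk [] = s.filter (fun e => pvKey s prio e == kk) := by
  rw [pv_stepA_split]
  show (s.foldl (fun d e => d.modify (pvKey s prio e) [] (fun l => l ++ [e]))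
    PySem.Dict.empty).getD kk [] = _
  have h1 : (s.foldl (fun d e => d.modify (pvKey s prio e) [] (fun l => l ++ [e]))
      PySem.Dict.empty) =
      ((s.map (fun e => (pvKey s prio e, e))).foldl
        (fun d p => d.modify p.1 [] (fun l => l ++ [p.2])) PySem.Dict.empty) := by
    rw [List.foldl_map]
  rw [h1, PySem.Dict.getD_foldl_modify_append, List.filter_map]
  simp [Function.comp_def]

theorem pv_stepA_items (s : PySem.Set (Int × Int)) (prio : List String) :
    (pvStepA s prio).1.items =
      (PySem.Set.ofList (s.map (pvKey s prio))).map
        (fun kk => (kk, s.filter (fun e => pvKey s prio e == kk))) := by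
  have hkeys : (pvStepA s prio).1.keys = PySem.Set.ofList (s.map (pvKey s prio)) := by
    rw [pv_stepA_split]
    show (s.foldl (fun d e => d.modify (pvKey s prio e) [] (fun l => l ++ [e]))
      PySem.Dict.empty).keys = _
    rw [PySem.Dict.keys_foldl_modify_key s (pvKey s prio) [] (fun d e l => l ++ [e])
      PySem.Dict.empty]
    rw [show (PySem.Dict.empty : PySem.Dict (Int × Int) (List (Int × Int))).keys = [] from rfl]
    exact PySem.Set.update_nil_left _
  have hnd : (pvStepA s prio).1.keys.Nodup := by
    rw [hkeys]; exact PySem.Set.nodup_ofList _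
  rw [PySem.Dict.items_eq_map_keys _ hnd []]
  rw [hkeys]
  apply List.map_congr_left
  intro kk _
  rw [pv_stepA_grp]

theorem pv_stepA_snd_mem (s : PySem.Set (Int × Int)) (prio : List String) (x : Int × Int) :
    x ∈ (pvStepA s prio).2 ↔ x ∈ s ∧ pvSpecIntent (pvMem s) prio x = none := by
  rw [pv_stepA_split]
  show x ∈ s.foldl (fun ns e => if (pvSpecIntent (pvMem s) prio e).isNone then
    PySem.Set.add ns e else ns) PySem.Set.empty ↔ _
  rw [pv_mem_condadd (fun e => (pvSpecIntent (pvMem s) prio e).isNone) s PySem.Set.empty x]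
  simp [PySem.Set.empty, Option.isNone_iff_eq_none]

theorem pv_reconcile_mem (items : List ((Int × Int) × List (Int × Int)))
    (next0 : PySem.Set (Int × Int)) (x : Int × Int) :
    x ∈ pvReconcile items next0 ↔ x ∈ next0 ∨ ∃ pg ∈ items,
      (pg.2.length = 1 ∧ x = pg.1) ∨ (pg.2.length ≠ 1 ∧ x ∈ pg.2) := by
  induction items generalizing next0 with
  | nil => simp [pvReconcile]
  | cons hd tl ih =>
    unfold pvReconcile
    simp only [List.foldl_cons]
    rw [show (tl.foldl (fun nx pg => if pg.2.length == 1 then PySem.Set.add nx pg.1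
        else pg.2.foldl (fun nx e => PySem.Set.add nx e) nx)
        (if hd.2.length == 1 then PySem.Set.add next0 hd.1
         else hd.2.foldl (fun nx e => PySem.Set.add nx e) next0)) =
      pvReconcile tl (if hd.2.length == 1 then PySem.Set.add next0 hd.1
         else hd.2.foldl (fun nx e => PySem.Set.add nx e) next0) from rfl]
    rw [ih]
    by_cases hl : hd.2.length = 1
    · rw [if_pos (by simpa using hl)]
      simp only [PySem.Set.mem_add, List.mem_cons]
      constructor
      · rintro ((h | rfl) | h)
        · exact Or.inl h
        · exact Or.inr ⟨hd, Or.inl rfl, Or.inl ⟨hl, rfl⟩⟩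
        · obtain ⟨pg, hpg, hc⟩ := h
          exact Or.inr ⟨pg, Or.inr hpg, hc⟩
      · rintro (h | ⟨pg, hpg | hpg, hc⟩)
        · exact Or.inl (Or.inl h)
        · subst hpg
          rcases hc with ⟨_, rfl⟩ | ⟨hne, _⟩
          · exact Or.inl (Or.inr rfl)
          · exact absurd hl hne
        · exact Or.inr ⟨pg, hpg, hc⟩
    · rw [if_neg (by simpa using hl)]
      have hmem : ∀ y, y ∈ hd.2.foldl (fun nx e => PySem.Set.add nx e) next0 ↔
          y ∈ next0 ∨ y ∈ hd.2 := by
        intro y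
        have := PySem.Set.mem_foldl_add hd.2 (fun e => e) next0 y
        simpa using this
      constructor
      · rintro (h | h)
        · rcases (hmem x).mp h with h' | h'
          · exact Or.inl h'
          · exact Or.inr ⟨hd, by simp, Or.inr ⟨hl, h'⟩⟩
        · obtain ⟨pg, hpg, hc⟩ := h
          exact Or.inr ⟨pg, List.mem_cons_of_mem _ hpg, hc⟩
      · rintro (h | ⟨pg, hpg, hc⟩)
        · exact Or.inl ((hmem x).mpr (Or.inl h))
        · rcases List.mem_cons.mp hpg with rfl | hpg'
          · rcases hc with ⟨h1, _⟩ | ⟨_, h2⟩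
            · exact absurd h1 hl
            · exact Or.inl ((hmem x).mpr (Or.inr h2))
          · exact Or.inr ⟨pg, hpg', hc⟩

-- == assembly ==

theorem pv_grp_movers (s : PySem.Set (Int × Int)) (prio : List String) (kk : Int × Int)
    (hkk : kk ∉ s) :
    s.filter (fun e => pvKey s prio e == kk) =
      s.filter (fun e => pvSpecIntent (pvMem s) prio e == some kk) := by
  apply List.filter_congr
  intro e he
  unfold pvKey
  cases hi : pvSpecIntent (pvMem s) prio e with
  | none =>
    have : (e == kk) = false := by
      simp only [beq_eq_false_iff_ne, ne_eq]
      exact fun h => hkk (h ▸ he)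
    simp [this, hi]
  | some t => simp

theorem pv_grp_stay (s : PySem.Set (Int × Int)) (prio : List String) (kk : Int × Int)
    (hs : s.Nodup) (hkk : kk ∈ s) (hnone : pvSpecIntent (pvMem s) prio kk = none) :
    s.filter (fun e => pvKey s prio e == kk) = [kk] := by
  have hcong : s.filter (fun e => pvKey s prio e == kk) =
      s.filter (fun e => e == kk) := by
    apply List.filter_congr
    intro e he
    unfold pvKey
    cases hi : pvSpecIntent (pvMem s) prio e with
    | none => simp
    | some t =>
      have ht : t ∉ s := pv_target_not_mem s prio e t hi
      have h1 : (t == kk) = false := by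
        simp only [beq_eq_false_iff_ne, ne_eq]
        exact fun h => ht (h ▸ hkk)
      have h2 : (e == kk) = false := by
        simp only [beq_eq_false_iff_ne, ne_eq]
        intro h
        subst h
        rw [hi] at hnone
        exact absurd hnone (by simp)
      rw [h1, h2]
  rw [hcong]
  have h3 : (fun (e : Int × Int) => e == kk) = (fun e => decide (e = kk)) := by
    funext e; rw [Bool.eq_iff_iff]; simp
  rw [h3, List.filter_eq, List.count_eq_one_of_mem hs hkk]
  rfl

theorem pv_nextA_mem (s : PySem.Set (Int × Int)) (prio : List String) (hs : s.Nodup)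
    (x : Int × Int) : x ∈ pvNextA s prio ↔ ∃ e ∈ s, pvDest s prio e = x := by
  unfold pvNextA
  rw [pv_reconcile_mem, pv_stepA_snd_mem, pv_stepA_items]
  constructor
  · rintro (⟨hxs, hnone⟩ | ⟨pg, hpg, hc⟩)
    · exact ⟨x, hxs, by simp [pvDest, hnone]⟩
    · obtain ⟨kk, hkk, rfl⟩ := List.mem_map.mp hpg
      have hkk' : kk ∈ PySem.Set.ofList (s.map (pvKey s prio)) := hkk
      rw [PySem.Set.mem_ofList, List.mem_map] at hkk'
      obtain ⟨e0, he0, hke0⟩ := hkk'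
      dsimp only at hc
      by_cases hkmem : kk ∈ s
      · have hnone : pvSpecIntent (pvMem s) prio kk = none := by
          unfold pvKey at hke0
          cases hi : pvSpecIntent (pvMem s) prio e0 with
          | none => rw [hi] at hke0; dsimp at hke0; subst hke0; exact hi
          | some t =>
            rw [hi] at hke0; dsimp at hke0; subst hke0
            exact absurd hkmem (pv_target_not_mem s prio e0 _ hi)
        rw [pv_grp_stay s prio kk hs hkmem hnone] at hc
        rcases hc with ⟨_, rfl⟩ | ⟨hne, _⟩
        · exact ⟨x, hkmem, by simp [pvDest, hnone]⟩
        · simp at hne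
      · rw [pv_grp_movers s prio kk hkmem] at hc
        rcases hc with ⟨hlen, rfl⟩ | ⟨hlen, hmem⟩
        · have hne : s.filter (fun e => pvSpecIntent (pvMem s) prio e == some x) ≠ [] := by
            intro h
            rw [h] at hlen
            simp at hlen
          obtain ⟨e1, he1⟩ := List.exists_mem_of_ne_nil _ hne
          have he1s : e1 ∈ s := (List.mem_filter.mp he1).1
          have he1i : pvSpecIntent (pvMem s) prio e1 = some x := by
            have := (List.mem_filter.mp he1).2
            simpa using this
          exact ⟨e1, he1s, by simp [pvDest, he1i, List.countP_eq_length_filter, hlen]⟩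
        · have hxs : x ∈ s := (List.mem_filter.mp hmem).1
          have hxi : pvSpecIntent (pvMem s) prio x = some kk := by
            have := (List.mem_filter.mp hmem).2
            simpa using this
          exact ⟨x, hxs, by simp [pvDest, hxi, List.countP_eq_length_filter, hlen]⟩
  · rintro ⟨e, he, rfl⟩
    cases hi : pvSpecIntent (pvMem s) prio e with
    | none =>
      rw [show pvDest s prio e = e from by simp [pvDest, hi]]
      exact Or.inl ⟨he, hi⟩
    | some t =>
      right
      have htns : t ∉ s := pv_target_not_mem s prio e t hi
      have hkeye : pvKey s prio e = t := by unfold pvKey; rw [hi]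
      have hkmem : t ∈ PySem.Set.ofList (s.map (pvKey s prio)) := by
        rw [PySem.Set.mem_ofList, List.mem_map]
        exact ⟨e, he, hkeye⟩
      refine ⟨(t, s.filter (fun e => pvKey s prio e == t)), List.mem_map.mpr ⟨t, hkmem, rfl⟩, ?_⟩
      dsimp only
      rw [pv_grp_movers s prio t htns]
      by_cases hcnt : s.countP (fun q => pvSpecIntent (pvMem s) prio q == some t) = 1
      · rw [show pvDest s prio e = t from by simp [pvDest, hi, hcnt]]
        exact Or.inl ⟨by rw [← List.countP_eq_length_filter]; exact hcnt, rfl⟩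
      · rw [show pvDest s prio e = e from by simp [pvDest, hi, hcnt]]
        refine Or.inr ⟨by rw [← List.countP_eq_length_filter]; exact hcnt, ?_⟩
        rw [List.mem_filter]
        exact ⟨he, by simp [hi]⟩

theorem pv_nodup_condadd (m : (Int × Int) → Bool) (l : List (Int × Int))
    (acc : PySem.Set (Int × Int)) (h : acc.Nodup) :
    (l.foldl (fun ns t => if m t then PySem.Set.add ns t else ns) acc).Nodup := by
  induction l generalizing acc with
  | nil => exact h
  | cons hd tl ih =>
    simp only [List.foldl_cons]
    by_cases hm : m hd = true
    · rw [hm, if_pos rfl]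
      exact ih _ (PySem.Set.nodup_add _ _ h)
    · rw [if_neg (by simpa using hm)]
      exact ih _ h

theorem pv_reconcile_nodup (items : List ((Int × Int) × List (Int × Int)))
    (next0 : PySem.Set (Int × Int)) (h : next0.Nodup) : (pvReconcile items next0).Nodup := by
  induction items generalizing next0 with
  | nil => exact h
  | cons hd tl ih =>
    unfold pvReconcile
    simp only [List.foldl_cons]
    rw [show (tl.foldl (fun nx pg => if pg.2.length == 1 then PySem.Set.add nx pg.1
        else pg.2.foldl (fun nx e => PySem.Set.add nx e) nx)
        (if hd.2.length == 1 then PySem.Set.add next0 hd.1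
         else hd.2.foldl (fun nx e => PySem.Set.add nx e) next0)) =
      pvReconcile tl (if hd.2.length == 1 then PySem.Set.add next0 hd.1
         else hd.2.foldl (fun nx e => PySem.Set.add nx e) next0) from rfl]
    apply ih
    by_cases hl : hd.2.length = 1
    · rw [if_pos (by simpa using hl)]
      exact PySem.Set.nodup_add _ _ h
    · rw [if_neg (by simpa using hl)]
      have heq : hd.2.foldl (fun nx e => PySem.Set.add nx e) next0 =
          PySem.Set.update next0 hd.2 := by
        have := PySem.Set.update_map_eq_foldl_add hd.2 (fun e => e) next0
        simpa using this.symm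
      rw [heq]
      exact PySem.Set.nodup_update _ _ h

theorem pv_nextA_nodup (s : PySem.Set (Int × Int)) (prio : List String) :
    (pvNextA s prio).Nodup := by
  unfold pvNextA
  apply pv_reconcile_nodup
  rw [pv_stepA_split]
  exact pv_nodup_condadd _ s PySem.Set.empty List.nodup_nil

theorem pv_stopA (s : PySem.Set (Int × Int)) (prio : List String) (hs : s.Nodup) :
    (PySem.Set.len (PySem.Set.union s (pvNextA s prio)) == PySem.Set.len (pvNextA s prio)) = true ↔
      ∀ e ∈ s, pvDest s prio e = e := by
  have hlen : ∀ (a b : PySem.Set (Int × Int)),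
      (PySem.Set.len a == PySem.Set.len b) = true ↔ a.length = b.length := by
    intro a b
    show (((a.length : Int)) == ((b.length : Int))) = true ↔ _
    simp
  rw [hlen]
  constructor
  · intro hleq e he
    by_contra hne
    have hennext : e ∉ pvNextA s prio := by
      intro hmem
      obtain ⟨e', he', hd'⟩ := (pv_nextA_mem s prio hs e).mp hmem
      cases hi : pvSpecIntent (pvMem s) prio e' with
      | none =>
        have : e' = e := by
          have : pvDest s prio e' = e' := by simp [pvDest, hi]
          rw [this] at hd'
          exact hd'
        subst this
        exact hne hd'
      | some t =>
        by_cases hcnt : s.countP (fun q => pvSpecIntent (pvMem s) prio q == some t) = 1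
        · have : pvDest s prio e' = t := by simp [pvDest, hi, hcnt]
          rw [this] at hd'
          subst hd'
          exact pv_target_not_mem s prio e' _ hi he
        · have : pvDest s prio e' = e' := by simp [pvDest, hi, hcnt]
          rw [this] at hd'
          subst hd'
          exact hne (by simp [pvDest, hi, hcnt])
    have hsub : (e :: pvNextA s prio) ⊆ PySem.Set.union s (pvNextA s prio) := by
      intro y hy
      rcases List.mem_cons.mp hy with rfl | hy'
      · exact (PySem.Set.mem_union _ _ _).mpr (Or.inl he)
      · exact (PySem.Set.mem_union _ _ _).mpr (Or.inr hy')
    have hnd : (e :: pvNextA s prio).Nodup := by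
      rw [List.nodup_cons]
      exact ⟨hennext, pv_nextA_nodup s prio⟩
    have hle := (hnd.subperm hsub).length_le
    simp only [List.length_cons] at hle
    omega
  · intro hstay
    have hperm : (PySem.Set.union s (pvNextA s prio)).Perm (pvNextA s prio) := by
      rw [List.perm_ext_iff_of_nodup (PySem.Set.nodup_union _ _ hs) (pv_nextA_nodup s prio)]
      intro a
      rw [PySem.Set.mem_union]
      constructor
      · rintro (ha | ha)
        · exact (pv_nextA_mem s prio hs a).mpr ⟨a, ha, hstay a ha⟩
        · exact ha
      · intro ha
        exact Or.inr ha
    exact hperm.length_eq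

theorem pv_dest_perm (s1 s2 : List (Int × Int)) (hp : s1.Perm s2) (prio : List String)
    (p : Int × Int) : pvDest s1 prio p = pvDest s2 prio p := by
  have hm : pvMem s1 = pvMem s2 := by
    funext x
    rw [Bool.eq_iff_iff]
    show PySem.Set.contains s1 x = true ↔ PySem.Set.contains s2 x = true
    rw [PySem.Set.contains_iff, PySem.Set.contains_iff]
    exact hp.mem_iff
  unfold pvDest
  rw [hm]
  rcases hI : pvSpecIntent (pvMem s2) prio p with _ | t
  · simp [hI]
  · simp [hI, hp.countP_eq]

theorem pv_inv_step (prio : List String) (k : Int) :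
    pvInv prio k →
    pvInv (match prio with | [] => [] | c :: rest => rest ++ [c]) (PySem.Int.mod (k + 1) 4) := by
  intro h
  rcases h with ⟨h1,h2⟩|⟨h1,h2⟩|⟨h1,h2⟩|⟨h1,h2⟩ <;> subst h1 <;> subst h2 <;> unfold pvInv <;> simp

theorem pv_loop (fuel : Nat) : ∀ (s1 s2 : PySem.Set (Int × Int)) (prio : List String) (k : Int)
    (ρ : Int), s1.Nodup → s2.Nodup → s1.Perm s2 → pvInv prio k →
    pvLoopA fuel s1 prio ρ = pvLoopB fuel s2 k ρ := by
  induction fuel with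
  | zero => intro s1 s2 prio k ρ _ _ _ _; rfl
  | succ fuel ih =>
    intro s1 s2 prio k ρ h1 h2 hp hinv
    simp only [pvLoopA, pvLoopB]
    have hstop : (PySem.Set.len (PySem.Set.union s1 (pvNextA s1 prio)) ==
        PySem.Set.len (pvNextA s1 prio)) = (!(pvStepB s2 k).2) := by
      rw [Bool.eq_iff_iff, pv_stopA s1 prio h1, Bool.not_eq_true']
      rw [← Bool.not_eq_true, pv_movedB s2 prio k h2 hinv]
      push_neg
      constructor
      · intro h e he
        rw [← pv_dest_perm s1 s2 hp]
        exact h e (hp.mem_iff.mpr he)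
      · intro h e he
        rw [pv_dest_perm s1 s2 hp]
        exact h e (hp.mem_iff.mp he)
    rw [hstop]
    cases hmv : (pvStepB s2 k).2 with
    | false => simp
    | true =>
      simp only [Bool.not_true, Bool.false_eq_true, if_false, reduceIte]
      apply ih
      · exact pv_nextA_nodup s1 prio
      · rw [pv_nextB_eq s2 prio k h2 hinv]
        exact PySem.Set.nodup_ofList _
      · rw [pv_nextB_eq s2 prio k h2 hinv]
        rw [List.perm_ext_iff_of_nodup (pv_nextA_nodup s1 prio) (PySem.Set.nodup_ofList _)]
        intro a
        rw [pv_nextA_mem s1 prio h1, PySem.Set.mem_ofList, List.mem_map]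
        constructor
        · rintro ⟨e, he, hd⟩
          exact ⟨e, hp.mem_iff.mp he, by rw [← pv_dest_perm s1 s2 hp]; exact hd⟩
        · rintro ⟨e, he, hd⟩
          exact ⟨e, hp.mem_iff.mpr he, by rw [pv_dest_perm s1 s2 hp]; exact hd⟩
      · exact pv_inv_step prio k hinv

-- ===== VERDICT (by name: the statement is the Claim_ definition above) =====
theorem part2_spec : Claim_equal_part2 := by
  intro elves _
  unfold Spec_part2 part2 part2_alt
  exact pv_loop 4294967296 (PySem.Set.ofList elves) (PySem.Set.ofList elves)
    ["N", "S", "W", "E"] 0 0 (PySem.Set.nodup_ofList elves) (PySem.Set.nodup_ofList elves)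
    (List.Perm.refl _) (by unfold pvInv; exact Or.inl ⟨rfl, rfl⟩)
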